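-- pv_equiv track=rewrite | github.com/Ace1928/refactor_forge | analyzer/module_detector.py | _group_related_boundaries
-- ===== SOURCE A (Python) =====
-- from typing import List, Dict, Any, Tuple
--
-- def _group_related_boundaries(boundaries: List[int], proximity_threshold: int = 10) -> List[List[int]]:
--     """Group closely related boundaries together.
--
--     Args:
--         boundaries: Line numbers of potential boundaries
--         proximity_threshold: Maximum lines between related boundaries
--
--     Returns:
--         Grouped boundaries forming coherent modules
--     """
--     grouped = []
--     current_group = []
--
--     for boundary in boundaries:
--         if not current_group or boundary - current_group[-1] < proximity_threshold:
--             current_group.append(boundary)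
--         else:
--             grouped.append(current_group)
--             current_group = [boundary]
--
--     if current_group:
--         grouped.append(current_group)
--
--     return grouped
-- ===== SOURCE B (Python) =====
-- def _group_related_boundaries(boundaries, proximity_threshold=10):
--     """Group closely related boundaries, built back-to-front.
--
--     Walks the boundaries from the last to the first; each boundary either
--     merges into the front of the first (leftmost) group built so far, when
--     the gap to its first element is below the threshold, or opens a new
--     group in front.  No trailing flush is needed.
--     """
--     groups = []
--     for b in reversed(boundaries):
--         if groups and groups[0][0] - b < proximity_threshold:
--             groups[0] = [b] + groups[0]
--         else:
--             groups = [[b]] + groups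
--     return groups
-- ===== Notes on version B (the rewrite author's own statement) =====
-- stated objective: alternative
-- what changed: B builds the grouping back-to-front: it traverses the boundaries in reverse and either merges each boundary into the front of the leftmost group or opens a new group, replacing A's forward accumulating loop with its separate current-group state and final flush.
import Mathlib
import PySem

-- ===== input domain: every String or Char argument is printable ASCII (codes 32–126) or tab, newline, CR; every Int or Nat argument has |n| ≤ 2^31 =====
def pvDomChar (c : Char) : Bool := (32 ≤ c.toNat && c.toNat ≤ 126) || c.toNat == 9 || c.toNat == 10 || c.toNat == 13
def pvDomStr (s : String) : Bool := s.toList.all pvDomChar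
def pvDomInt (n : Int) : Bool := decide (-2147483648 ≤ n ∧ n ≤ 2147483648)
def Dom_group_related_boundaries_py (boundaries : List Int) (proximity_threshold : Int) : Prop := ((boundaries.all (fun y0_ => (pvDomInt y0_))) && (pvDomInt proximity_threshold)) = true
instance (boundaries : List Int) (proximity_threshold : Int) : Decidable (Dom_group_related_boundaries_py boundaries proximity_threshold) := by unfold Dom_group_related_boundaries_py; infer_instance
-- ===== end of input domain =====

-- B groups back-to-front (reverse traversal merging into the head group) instead of A's
-- forward accumulating loop with a final flush; objective: alternative decomposition.

-- ===== PORT A =====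
-- A's loop state: (grouped, current_group); 'current_group[-1]' is getLast?.
def pvStepA (t : Int) (s : List (List Int) × List Int) (b : Int) : List (List Int) × List Int :=
  match s.2.getLast? with
  | none => (s.1, s.2 ++ [b])
  | some last => if b - last < t then (s.1, s.2 ++ [b]) else (s.1 ++ [s.2], [b])

def group_related_boundaries_py (boundaries : List Int) (proximity_threshold : Int) : List (List Int) :=
  let st := boundaries.foldl (pvStepA proximity_threshold) ([], [])
  if st.2 = [] then st.1 else st.1 ++ [st.2]

-- ===== PORT B =====
-- B's loop over reversed(boundaries) is a right fold; groups[0][0] is the head of the head group.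
def pvStepB (t : Int) (b : Int) (groups : List (List Int)) : List (List Int) :=
  match groups with
  | (h :: g) :: gs => if h - b < t then (b :: h :: g) :: gs else [b] :: (h :: g) :: gs
  | _ => [b] :: groups

def group_related_boundaries_py_alt (boundaries : List Int) (proximity_threshold : Int) : List (List Int) :=
  boundaries.foldr (pvStepB proximity_threshold) []

-- ===== PRECONDITION & SPEC =====
def Spec_group_related_boundaries_py (boundaries : List Int) (proximity_threshold : Int) (out : List (List Int)) : Prop := out = group_related_boundaries_py_alt boundaries proximity_threshold
instance (boundaries : List Int) (proximity_threshold : Int) (out : List (List Int)) : Decidable (Spec_group_related_boundaries_py boundaries proximity_threshold out) := by unfold Spec_group_related_boundaries_py; infer_instance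

-- ===== CLAIM (what is proved, stated in full; the proofs are below) =====
def Claim_equal_group_related_boundaries_py : Prop := ∀ (boundaries : List Int) (proximity_threshold : Int), Dom_group_related_boundaries_py boundaries proximity_threshold → Spec_group_related_boundaries_py boundaries proximity_threshold (group_related_boundaries_py boundaries proximity_threshold)

-- ===== LEMMAS AND PROOFS =====

-- Reference: split off the maximal leading chunk after a previous element p.
def pvChunk (t p : Int) : List Int → List Int × List Int
  | [] => ([], [])
  | x :: xs => if x - p < t then ((x :: (pvChunk t x xs).1), (pvChunk t x xs).2) else ([], x :: xs)

theorem pvChunk_snd_len (t p : Int) (xs : List Int) : (pvChunk t p xs).2.length ≤ xs.length := by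
  induction xs generalizing p with
  | nil => simp [pvChunk]
  | cons x xs ih =>
    simp only [pvChunk]
    split
    · exact le_trans (ih x) (Nat.le_succ _)
    · simp

def pvRef (t : Int) : List Int → List (List Int)
  | [] => []
  | x :: xs => (x :: (pvChunk t x xs).1) :: pvRef t (pvChunk t x xs).2
termination_by xs => xs.length
decreasing_by
  simpa using Nat.lt_succ_of_le (pvChunk_snd_len t x xs)

theorem pvB_eq_ref (t : Int) (xs : List Int) :
    group_related_boundaries_py_alt xs t = pvRef t xs := by
  induction xs with
  | nil => simp [group_related_boundaries_py_alt, pvRef]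
  | cons x xs ih =>
    simp only [group_related_boundaries_py_alt, List.foldr_cons] at *
    rw [ih]
    cases xs with
    | nil => simp [pvRef, pvStepB, pvChunk]
    | cons y ys =>
      rw [pvRef, pvRef]
      simp only [pvStepB, pvChunk]
      by_cases h : y - x < t
      · simp [h]
      · simp [h, pvRef]

def pvFinish (s : List (List Int) × List Int) : List (List Int) :=
  if s.2 = [] then s.1 else s.1 ++ [s.2]

theorem pvA_fold (t : Int) (xs : List Int) :
    ∀ (gs : List (List Int)) (cur : List Int) (p : Int), cur.getLast? = some p →
      pvFinish (xs.foldl (pvStepA t) (gs, cur)) =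
        gs ++ (cur ++ (pvChunk t p xs).1) :: pvRef t (pvChunk t p xs).2 := by
  induction xs with
  | nil =>
    intro gs cur p hp
    have hcur : cur ≠ [] := by intro h; simp [h] at hp
    simp [pvFinish, pvChunk, pvRef, hcur]
  | cons x xs ih =>
    intro gs cur p hp
    simp only [List.foldl_cons, pvStepA, hp, pvChunk]
    by_cases h : x - p < t
    · simp only [h, if_pos]
      rw [ih gs (cur ++ [x]) x (by simp)]
      simp
    · simp only [h, if_false]
      rw [ih (gs ++ [cur]) [x] x (by simp)]
      rw [pvRef]
      simp

theorem pvA_eq_ref (t : Int) (xs : List Int) :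
    group_related_boundaries_py xs t = pvFinish (xs.foldl (pvStepA t) ([], [])) := by
  simp [group_related_boundaries_py, pvFinish]

theorem pvA_eq_ref' (t : Int) (xs : List Int) :
    group_related_boundaries_py xs t = pvRef t xs := by
  rw [pvA_eq_ref]
  cases xs with
  | nil => simp [pvFinish, pvRef]
  | cons x xs =>
    have h0 : pvStepA t ([], []) x = ([], [x]) := by simp [pvStepA]
    rw [List.foldl_cons, h0, pvA_fold t xs [] [x] x (by simp), pvRef]
    simp

-- ===== VERDICT (by name: the statement is the Claim_ definition above) =====
theorem group_related_boundaries_py_spec : Claim_equal_group_related_boundaries_py := by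
  intro boundaries t _
  unfold Spec_group_related_boundaries_py
  rw [pvA_eq_ref', pvB_eq_ref]
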